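-- pv_equiv track=rewrite | github.com/seanshahkarami/trek | trek.py | make_csq_display
-- ===== SOURCE A (Python) =====
-- csq_marginal = 9
--
-- csq_ok = 14
--
-- csq_good = 19
--
-- csq_excellent = 30
--
-- def csq_name(csq):
--     if csq <= csq_marginal:
--         return 'marginal'
--     elif csq <= csq_ok:
--         return 'ok'
--     elif csq <= csq_good:
--         return 'good'
--     elif csq <= csq_excellent:
--         return 'excellent'
--     else:
--         return 'searching'
--
-- def make_csq_display(csq):
--     display = []
--
--     # reset color and add opening [
--     display.append('\033[0m[')
--
--     for i in range(1, csq_excellent + 1):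
--         # set color
--         if i <= csq_marginal:
--             display.append('\033[31m')
--         elif i <= csq_ok:
--             display.append('\033[33m')
--         elif i <= csq_good:
--             display.append('\033[32m')
--         elif i <= csq_excellent:
--             display.append('\033[34m')
--
--         # add marker
--         if i <= csq:
--             display.append('#')
--         else:
--             display.append('.')
--
--     # reset color and add closing ]
--     display.append('\033[0m] {} / {} ({})'.format(csq,
--                                                   csq_excellent, csq_name(csq)))
--     return ''.join(display)
-- ===== SOURCE B (Python) =====
-- def _bar(mark):
--     colors = ['\033[31m'] * 9 + ['\033[33m'] * 5 + ['\033[32m'] * 5 + ['\033[34m'] * 11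
--     return '\033[0m[' + ''.join(c + mark for c in colors)
--
-- _FULL = _bar('#')
-- _EMPTY = _bar('.')
-- _NAMES = ('marginal', 'ok', 'good', 'excellent', 'searching')
--
-- def make_csq_display(csq):
--     cut = 5 + 6 * min(max(csq, 0), 30)
--     name = _NAMES[sum(b < csq for b in (9, 14, 19, 30))]
--     return _FULL[:cut] + _EMPTY[cut:] + '\033[0m] {} / {} ({})'.format(csq, 30, name)
-- ===== Notes on version B (the rewrite author's own statement) =====
-- stated objective: alternative
-- what changed: B does no per-position work at call time: it precomputes two constant bar templates (all '#' and all '.'), splices them with one slice at a cut offset computed arithmetically from a clamp of csq, and looks the quality name up by a rank sum over the four thresholds instead of an if/elif chain.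
import Mathlib
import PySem

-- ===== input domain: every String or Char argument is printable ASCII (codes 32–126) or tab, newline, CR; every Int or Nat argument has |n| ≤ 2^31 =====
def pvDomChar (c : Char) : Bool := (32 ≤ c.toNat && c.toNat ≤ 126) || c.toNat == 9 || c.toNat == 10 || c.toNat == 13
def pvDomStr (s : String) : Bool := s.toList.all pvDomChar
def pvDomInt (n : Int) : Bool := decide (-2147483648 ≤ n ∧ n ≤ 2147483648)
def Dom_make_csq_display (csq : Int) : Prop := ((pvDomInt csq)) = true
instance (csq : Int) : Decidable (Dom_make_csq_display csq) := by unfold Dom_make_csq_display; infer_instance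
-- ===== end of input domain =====

-- B precomputes two constant bar templates (all-'#' and all-'.') and splices them with one
-- slice at a cut offset computed arithmetically from csq; the name is a rank-sum table lookup
-- (objective: alternative — no per-position loop or branch at call time).

-- ===== PORT A =====
def csq_name_A (csq : Int) : String :=
  if csq ≤ 9 then "marginal"
  else if csq ≤ 14 then "ok"
  else if csq ≤ 19 then "good"
  else if csq ≤ 30 then "excellent"
  else "searching"

def make_csq_display (csq : Int) : String :=
  let display : List String := ["\x1b[0m["]
  let display := (PySem.List.pyRange 1 (30 + 1) 1).foldl (fun d i =>
    let d :=
      if i ≤ 9 then d ++ ["\x1b[31m"]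
      else if i ≤ 14 then d ++ ["\x1b[33m"]
      else if i ≤ 19 then d ++ ["\x1b[32m"]
      else if i ≤ 30 then d ++ ["\x1b[34m"]
      else d
    if i ≤ csq then d ++ ["#"] else d ++ ["."]) display
  let display := display ++
    ["\x1b[0m] " ++ PySem.Int.toStr csq ++ " / " ++ PySem.Int.toStr 30 ++ " (" ++ csq_name_A csq ++ ")"]
  PySem.Str.join "" display

-- ===== PORT B =====
def pvBarTemplate (mark : String) : String :=
  let colors := List.replicate 9 "\x1b[31m" ++ List.replicate 5 "\x1b[33m" ++
    List.replicate 5 "\x1b[32m" ++ List.replicate 11 "\x1b[34m"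
  "\x1b[0m[" ++ PySem.Str.join "" (colors.map (fun c => c ++ mark))

def pvFull : String := pvBarTemplate "#"
def pvEmpty : String := pvBarTemplate "."
def pvNames : List String := ["marginal", "ok", "good", "excellent", "searching"]

def make_csq_display_alt (csq : Int) : String :=
  let cut : Int := 5 + 6 * min (max csq 0) 30
  -- _NAMES[sum(b < csq …)]: the index is ≤ 4, always in range, so the getD default is never used
  let name := (PySem.List.pyGet? pvNames (([(9:Int), 14, 19, 30].countP (fun b => b < csq) : Nat) : Int)).getD ""
  PySem.Str.slice pvFull none (some cut) ++ PySem.Str.slice pvEmpty (some cut) none ++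
    "\x1b[0m] " ++ PySem.Int.toStr csq ++ " / " ++ PySem.Int.toStr 30 ++ " (" ++ name ++ ")"

-- ===== PRECONDITION & SPEC =====
def Spec_make_csq_display (csq : Int) (out : String) : Prop := out = make_csq_display_alt csq
instance (csq : Int) (out : String) : Decidable (Spec_make_csq_display csq out) := by unfold Spec_make_csq_display; infer_instance

-- ===== CLAIM (what is proved, stated in full; the proofs are below) =====
def Claim_equal_make_csq_display : Prop := ∀ (csq : Int), Dom_make_csq_display csq → Spec_make_csq_display csq (make_csq_display csq)

-- ===== LEMMAS AND PROOFS =====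

-- the color A picks for position i (proof helper; A's loop only sees 1 ≤ i ≤ 30)
def pvColorA (i : Int) : String :=
  if i ≤ 9 then "\x1b[31m"
  else if i ≤ 14 then "\x1b[33m"
  else if i ≤ 19 then "\x1b[32m"
  else "\x1b[34m"

-- A's loop body (ζ-reduced) appends exactly [color i, marker i] per position
lemma pvFoldA (csq : Int) (l : List Int) (init : List String) (h : ∀ i ∈ l, i ≤ 30) :
    l.foldl (fun d i =>
      if i ≤ csq then
        (if i ≤ 9 then d ++ ["\x1b[31m"]
         else if i ≤ 14 then d ++ ["\x1b[33m"]
         else if i ≤ 19 then d ++ ["\x1b[32m"]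
         else if i ≤ 30 then d ++ ["\x1b[34m"]
         else d) ++ ["#"]
      else
        (if i ≤ 9 then d ++ ["\x1b[31m"]
         else if i ≤ 14 then d ++ ["\x1b[33m"]
         else if i ≤ 19 then d ++ ["\x1b[32m"]
         else if i ≤ 30 then d ++ ["\x1b[34m"]
         else d) ++ ["."]) init
    = init ++ l.flatMap (fun i => [pvColorA i, if i ≤ csq then "#" else "."]) := by
  induction l generalizing init with
  | nil => simp
  | cons x xs ih =>
    have hx : x ≤ 30 := h x (by simp)
    have hstep : (if x ≤ csq then
        (if x ≤ 9 then init ++ ["\x1b[31m"]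
         else if x ≤ 14 then init ++ ["\x1b[33m"]
         else if x ≤ 19 then init ++ ["\x1b[32m"]
         else if x ≤ 30 then init ++ ["\x1b[34m"]
         else init) ++ ["#"]
      else
        (if x ≤ 9 then init ++ ["\x1b[31m"]
         else if x ≤ 14 then init ++ ["\x1b[33m"]
         else if x ≤ 19 then init ++ ["\x1b[32m"]
         else if x ≤ 30 then init ++ ["\x1b[34m"]
         else init) ++ ["."])
        = init ++ [pvColorA x, if x ≤ csq then "#" else "."] := by
      unfold pvColorA
      split_ifs <;> simp
    rw [List.foldl_cons, hstep, ih _ (fun i hi => h i (by simp [hi])), List.flatMap_cons]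
    simp


-- Chars.join with empty separator is flatten
lemma pvJoinNil : ∀ (xss : List (List Char)), PySem.Chars.join [] xss = xss.flatten := by
  intro xss
  induction xss with
  | nil => simp [PySem.Chars.join_nil]
  | cons p rest ih =>
    cases rest with
    | nil => simp [PySem.Chars.join_singleton]
    | cons q r =>
      rw [PySem.Chars.join_cons_cons]
      simp_all

-- flatten of A's two-strings-per-position list, on the character level
lemma pvFlatPairs (l : List Int) (f g : Int → String) :
    ((l.flatMap (fun i => [f i, g i])).map String.toList).flatten
      = l.flatMap (fun i => (f i).toList ++ (g i).toList) := by
  induction l with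
  | nil => simp
  | cons x xs ih => simp [ih]

-- SPLICE: cutting the all-'#' bar and the all-'.' bar at 6 × (number of positions ≤ csq)
-- and gluing yields the mixed bar (segments all have length 6, l ascending, P downward closed)
lemma pvSplice (P : Int → Bool) (F G : Int → List Char)
    (h6F : ∀ i, (F i).length = 6) (h6G : ∀ i, (G i).length = 6)
    (hmono : ∀ a b, a ≤ b → P b → P a) :
    ∀ (l : List Int), l.Pairwise (· ≤ ·) →
    (l.flatMap F).take (6 * l.countP P) ++ (l.flatMap G).drop (6 * l.countP P)
      = l.flatMap (fun i => if P i then F i else G i) := by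
  intro l hp
  induction l with
  | nil => simp
  | cons x xs ih =>
    rcases List.pairwise_cons.mp hp with ⟨hx, hxs⟩
    by_cases hPx : P x = true
    · have hc : (x :: xs).countP P = xs.countP P + 1 := by simp [hPx]
      rw [hc, List.flatMap_cons, List.flatMap_cons]
      have e : 6 * (xs.countP P + 1) = 6 + 6 * xs.countP P := by ring
      rw [e, List.take_append, List.drop_append]
      rw [List.take_of_length_le (by rw [h6F]; omega)]
      rw [List.drop_eq_nil_of_le (by rw [h6G]; omega)]
      rw [h6F, h6G]
      have e2 : 6 + 6 * xs.countP P - 6 = 6 * xs.countP P := by omega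
      rw [e2, List.nil_append, List.append_assoc, ih hxs]
      simp [hPx]
    · have hall : ∀ i ∈ x :: xs, P i = false := by
        intro i hi
        rcases List.mem_cons.mp hi with h | h
        · subst h; simpa using hPx
        · by_contra hcon
          exact hPx (hmono x i (hx i h) (by simpa using hcon))
      have hc : (x :: xs).countP P = 0 := List.countP_eq_zero.mpr (by
        intro i hi; simpa using hall i hi)
      rw [hc]
      simp only [Nat.mul_zero, List.take_zero, List.drop_zero, List.nil_append]
      exact (List.flatMap_congr (by intro i hi; simp [hall i hi])).symm

-- the number of positions 1..30 at or below csq is the clamp of csq to [0, 30]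
lemma pvCount (csq : Int) :
    (PySem.List.pyRange 1 (30 + 1) 1).countP (fun i => decide (i ≤ csq))
      = (min (max csq 0) 30).toNat := by
  by_cases h1 : csq ≤ 0
  · have h : ∀ i ∈ PySem.List.pyRange 1 (30 + 1) 1, ¬ (decide (i ≤ csq) = true) := by
      intro i hi
      rw [PySem.List.mem_pyRange_one] at hi
      simp; omega
    rw [List.countP_eq_zero.mpr h]
    omega
  · by_cases h2 : 30 ≤ csq
    · have h : ∀ i ∈ PySem.List.pyRange 1 (30 + 1) 1, decide (i ≤ csq) = true := by
        intro i hi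
        rw [PySem.List.mem_pyRange_one] at hi
        simp; omega
      rw [List.countP_eq_length.mpr h]
      have hr : PySem.List.pyRange 1 (30 + 1) 1
          = [1,2,3,4,5,6,7,8,9,10,11,12,13,14,15,16,17,18,19,20,21,22,23,24,25,26,27,28,29,30] := by decide
      rw [hr]
      simp
      omega
    · have hmin : min (max csq 0) 30 = csq := by omega
      rw [hmin]
      interval_cases csq <;> decide

-- the two templates, decomposed into prefix + one 6-character block per position
set_option maxRecDepth 10000 in
lemma pvFullEq : pvFull.toList
    = "\x1b[0m[".toList ++ (PySem.List.pyRange 1 (30 + 1) 1).flatMap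
        (fun i => (pvColorA i).toList ++ ['#']) := by decide

set_option maxRecDepth 10000 in
lemma pvEmptyEq : pvEmpty.toList
    = "\x1b[0m[".toList ++ (PySem.List.pyRange 1 (30 + 1) 1).flatMap
        (fun i => (pvColorA i).toList ++ ['.']) := by decide

-- B's rank-sum table lookup computes A's if/elif name chain
lemma pvNameEq (csq : Int) :
    (PySem.List.pyGet? pvNames (([(9:Int), 14, 19, 30].countP (fun b => decide (b < csq)) : Nat) : Int)).getD ""
      = csq_name_A csq := by
  unfold csq_name_A
  by_cases h1 : csq ≤ 9 <;> by_cases h2 : csq ≤ 14 <;> by_cases h3 : csq ≤ 19 <;>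
    by_cases h4 : csq ≤ 30 <;>
  · first
    | omega
    | (have c9 : decide ((9:Int) < csq) = decide ¬ (csq ≤ 9) := by simp
       have c14 : decide ((14:Int) < csq) = decide ¬ (csq ≤ 14) := by simp
       have c19 : decide ((19:Int) < csq) = decide ¬ (csq ≤ 19) := by simp
       have c30 : decide ((30:Int) < csq) = decide ¬ (csq ≤ 30) := by simp
       simp [c9, c14, c19, c30, h1, h2, h3, h4, pvNames, PySem.List.pyGet?, PySem.List.pyIdx?])

set_option maxRecDepth 8000 in
set_option maxHeartbeats 1000000 in
lemma pvMain (csq : Int) : make_csq_display csq = make_csq_display_alt csq := by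
  apply String.toList_inj.mp
  simp only [make_csq_display, make_csq_display_alt]
  rw [pvFoldA csq _ _ (by intro i hi; rw [PySem.List.mem_pyRange_one] at hi; omega)]
  rw [pvNameEq]
  rw [PySem.Str.toList_join]
  have hsep : ("" : String).toList = [] := rfl
  rw [hsep, List.map_append, List.map_append, pvJoinNil, List.flatten_append,
      List.flatten_append]
  simp only [List.map_cons, List.map_nil, List.flatten_cons, List.flatten_nil,
    List.append_nil, pvFlatPairs]
  -- RHS: slices to take/drop
  have h0 : (0:Int) ≤ 5 + 6 * min (max csq 0) 30 := by omega
  simp only [String.toList_append, PySem.Str.toList_slice, PySem.Chars.slice_eq_listSlice]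
  rw [PySem.List.slice_to _ h0, PySem.List.slice_from _ h0]
  have hcut : (5 + 6 * min (max csq 0) 30).toNat
      = 5 + 6 * ((PySem.List.pyRange 1 (30 + 1) 1).countP (fun i => decide (i ≤ csq))) := by
    rw [pvCount]; omega
  rw [hcut, pvFullEq, pvEmptyEq]
  rw [List.take_append, List.drop_append]
  have hpre : ("\x1b[0m[".toList).length = 5 := by decide
  rw [List.take_of_length_le (by rw [hpre]; omega)]
  rw [List.drop_eq_nil_of_le (by rw [hpre]; omega)]
  rw [hpre]
  have e2 : 5 + 6 * ((PySem.List.pyRange 1 (30 + 1) 1).countP (fun i => decide (i ≤ csq))) - 5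
      = 6 * ((PySem.List.pyRange 1 (30 + 1) 1).countP (fun i => decide (i ≤ csq))) := by omega
  rw [e2, List.nil_append]
  have hsplice := pvSplice (fun i => decide (i ≤ csq))
    (fun i => (pvColorA i).toList ++ ['#']) (fun i => (pvColorA i).toList ++ ['.'])
    (by intro i; dsimp only [pvColorA]; split_ifs <;> rfl)
    (by intro i; dsimp only [pvColorA]; split_ifs <;> rfl)
    (by intro a b hab h; simp at h ⊢; omega)
    (PySem.List.pyRange 1 (30 + 1) 1) (by decide)
  have hbody2 : (PySem.List.pyRange 1 (30 + 1) 1).flatMap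
      (fun i => if decide (i ≤ csq) = true then (pvColorA i).toList ++ ['#'] else (pvColorA i).toList ++ ['.'])
      = (PySem.List.pyRange 1 (30 + 1) 1).flatMap
      (fun i => (pvColorA i).toList ++ (if i ≤ csq then ("#":String) else ".").toList) := by
    apply List.flatMap_congr
    intro i _
    by_cases h : i ≤ csq <;> simp [h]
  conv_rhs => rw [List.append_assoc "\x1b[0m[".toList, hsplice]
  beta_reduce
  rw [hbody2]
  simp [List.append_assoc]

-- ===== VERDICT (by name: the statement is the Claim_ definition above) =====
theorem make_csq_display_spec : Claim_equal_make_csq_display := by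
  intro csq _
  unfold Spec_make_csq_display
  exact pvMain csq
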